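-- pv_equiv track=rewrite | github.com/Kuhlman-Lab/evopro | evopro/utils/parsing_utils.py | constituents_of_modified_fasta
-- ===== SOURCE A (Python) =====
-- import string
-- from string import ascii_letters
--
-- def constituents_of_modified_fasta(x: str, chain_type: str):
--     """
--     Accepts amino acid and RNA/DNA inputs: 'agtc', 'AGT(ASP)TG', etc. Does not accept SMILES strings.
--     Returns constituents, e.g, [A, G, T, ASP, T, G] or None if string is incorrect.
--     Everything in returned list is single character, except for blocks specified in brackets.
--     """
--     if chain_type == "protein":
--         x = x.strip().upper()
--     # it is a bit strange that digits are here, but [NH2] was in one protein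
--     allowed_chars = ascii_letters + "()" + string.digits
--     if not all(letter in allowed_chars for letter in x):
--         return None
--
--     current_modified: str | None = None
--
--     constituents = []
--     for letter in x:
--         if letter == "(":
--             if current_modified is not None:
--                 return None  # double open bracket
--             current_modified = ""
--         elif letter == ")":
--             if current_modified is None:
--                 return None  # closed without opening
--             if len(current_modified) <= 1:
--                 return None  # empty modification: () or single (K)
--             constituents.append(current_modified)
--             current_modified = None
--         else:
--             if current_modified is not None:
--                 current_modified += letter
--             else:
--                 if letter not in ascii_letters:
--                     return None  # strange single-letter residue
--                 constituents.append(letter)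
--     if current_modified is not None:
--         return None  # did not close bracket
--     return constituents
-- ===== SOURCE B (Python) =====
-- import string
-- from string import ascii_letters
--
-- def constituents_of_modified_fasta(x: str, chain_type: str):
--     if chain_type == "protein":
--         x = x.strip().upper()
--     allowed_chars = ascii_letters + "()" + string.digits
--     if not all(letter in allowed_chars for letter in x):
--         return None
--     pieces = x.split(")")
--     constituents = []
--     for piece in pieces[:-1]:
--         if piece.count("(") != 1:
--             return None
--         plain, inner = piece.split("(")
--         if not all(letter in ascii_letters for letter in plain):
--             return None
--         if len(inner) <= 1:
--             return None
--         constituents.extend(plain)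
--         constituents.append(inner)
--     last = pieces[-1]
--     if "(" in last:
--         return None
--     if not all(letter in ascii_letters for letter in last):
--         return None
--     constituents.extend(last)
--     return constituents
-- ===== Notes on version B (the rewrite author's own statement) =====
-- stated objective: alternative
-- what changed: Replaces A's single-pass state machine (tracking an open-bracket accumulator char by char) with a split-on-')' decomposition: each piece before the last must contain exactly one '(' and splits into a plain-letter run plus a bracketed block, and the last piece must be bracket-free letters.
import Mathlib
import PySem

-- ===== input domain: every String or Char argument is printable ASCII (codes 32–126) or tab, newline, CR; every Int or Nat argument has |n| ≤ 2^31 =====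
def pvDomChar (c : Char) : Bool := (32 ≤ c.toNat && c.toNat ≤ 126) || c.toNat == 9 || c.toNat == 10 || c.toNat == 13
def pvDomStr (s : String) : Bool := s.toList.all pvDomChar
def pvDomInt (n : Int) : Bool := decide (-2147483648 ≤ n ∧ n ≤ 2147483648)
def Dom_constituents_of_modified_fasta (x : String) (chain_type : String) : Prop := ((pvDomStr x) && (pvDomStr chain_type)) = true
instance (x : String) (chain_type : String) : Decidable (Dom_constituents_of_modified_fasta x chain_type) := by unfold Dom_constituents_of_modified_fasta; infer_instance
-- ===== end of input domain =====

-- B parses by splitting on ')' into pieces instead of A's char-by-char state machine; objective: alternative (same cost, different decomposition).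

-- ===== PORT A =====
-- string.ascii_letters
def pvLetters : List Char := "abcdefghijklmnopqrstuvwxyzABCDEFGHIJKLMNOPQRSTUVWXYZ".toList
-- allowed_chars = ascii_letters + "()" + string.digits
def pvAllowed : List Char := pvLetters ++ "()".toList ++ "0123456789".toList

-- the 'for letter in x' loop of A, state = (constituents, current_modified)
def pvARun : List Char → List String → Option (List Char) → Option (List String)
  | [], acc, cm =>
      match cm with
      | some _ => none                     -- did not close bracket
      | none => some acc
  | c :: cs, acc, cm =>
      if c = '(' then
        match cm with
        | some _ => none                   -- double open bracket
        | none => pvARun cs acc (some [])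
      else if c = ')' then
        match cm with
        | none => none                     -- closed without opening
        | some m => if m.length ≤ 1 then none else pvARun cs (acc ++ [String.ofList m]) none
      else
        match cm with
        | some m => pvARun cs acc (some (m ++ [c]))
        | none =>
            if ¬ pvLetters.contains c then none
            else pvARun cs (acc ++ [String.ofList [c]]) none

def constituents_of_modified_fasta (x : String) (chain_type : String) : Option (List String) :=
  let x := if chain_type = "protein" then PySem.Str.upper (PySem.Str.strip x) else x
  if ¬ (x.toList.all fun c => pvAllowed.contains c) then none
  else pvARun x.toList [] none

-- ===== PORT B =====
-- B's loop over pieces[:-1] followed by the last piece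
def pvBPieces : List (List Char) → List String → Option (List String)
  | [], acc => some acc                    -- unreachable: split always yields ≥ 1 piece
  | [last], acc =>
      if last.contains '(' then none
      else if ¬ (last.all fun c => pvLetters.contains c) then none
      else some (acc ++ last.map fun c => String.ofList [c])
  | p :: ps, acc =>
      if p.count '(' ≠ 1 then none
      else
        let plain := p.takeWhile fun c => c ≠ '('
        let inner := (p.dropWhile fun c => c ≠ '(').tail
        if ¬ (plain.all fun c => pvLetters.contains c) then none
        else if inner.length ≤ 1 then none
        else pvBPieces ps (acc ++ (plain.map fun c => String.ofList [c]) ++ [String.ofList inner])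

def constituents_of_modified_fasta_alt (x : String) (chain_type : String) : Option (List String) :=
  let x := if chain_type = "protein" then PySem.Str.upper (PySem.Str.strip x) else x
  if ¬ (x.toList.all fun c => pvAllowed.contains c) then none
  else pvBPieces (PySem.Chars.splitOn x.toList [')']) []

-- ===== PRECONDITION & SPEC =====
def Spec_constituents_of_modified_fasta (x : String) (chain_type : String) (out : Option (List String)) : Prop := out = constituents_of_modified_fasta_alt x chain_type
instance (x : String) (chain_type : String) (out : Option (List String)) : Decidable (Spec_constituents_of_modified_fasta x chain_type out) := by unfold Spec_constituents_of_modified_fasta; infer_instance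

-- ===== CLAIM (what is proved, stated in full; the proofs are below) =====
def Claim_equal_constituents_of_modified_fasta : Prop := ∀ (x : String) (chain_type : String), Dom_constituents_of_modified_fasta x chain_type → Spec_constituents_of_modified_fasta x chain_type (constituents_of_modified_fasta x chain_type)

-- ===== LEMMAS AND PROOFS =====

-- proof-side reference splitter: x.split(")") on char lists
def pvSplit : List Char → List (List Char)
  | [] => [[]]
  | c :: cs =>
      if c = ')' then [] :: pvSplit cs
      else
        match pvSplit cs with
        | [] => [[c]]
        | p :: ps => (c :: p) :: ps

lemma pvSplit_ne_nil (cs : List Char) : pvSplit cs ≠ [] := by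
  cases cs with
  | nil => simp [pvSplit]
  | cons c cs =>
    simp only [pvSplit]
    split
    · simp
    · cases h : pvSplit cs <;> simp

lemma pvSplit_cons_close (cs : List Char) : pvSplit (')' :: cs) = [] :: pvSplit cs := by
  simp [pvSplit]

lemma pvSplit_cons_other (c : Char) (cs : List Char) (p : List Char) (ps : List (List Char))
    (hc : c ≠ ')') (hps : pvSplit cs = p :: ps) : pvSplit (c :: cs) = (c :: p) :: ps := by
  simp [pvSplit, hc, hps]

lemma splitOn_go_eq (cs : List Char) : ∀ fuel, cs.length ≤ fuel →
    ∀ cur acc, PySem.Chars.splitOn.go [')'] fuel cs cur acc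
      = acc.reverse ++ ((cur.reverse ++ (pvSplit cs).headI) :: (pvSplit cs).tail) := by
  induction cs with
  | nil =>
    intro fuel _ cur acc
    cases fuel <;> simp [PySem.Chars.splitOn.go, pvSplit]
  | cons c cs ih =>
    intro fuel hf cur acc
    cases fuel with
    | zero => simp at hf
    | succ fuel =>
      by_cases hc : c = ')'
      · subst hc
        rw [PySem.Chars.splitOn.go]
        simp only [List.isPrefixOf, beq_self_eq_true, Bool.true_and, if_pos,
          List.length_singleton, List.drop_one, List.tail_cons]
        rw [ih fuel (by simpa using hf) [] (cur.reverse :: acc), pvSplit_cons_close]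
        obtain ⟨p, ps, hps⟩ : ∃ p ps, pvSplit cs = p :: ps := by
          cases h : pvSplit cs with
          | nil => exact absurd h (pvSplit_ne_nil cs)
          | cons p ps => exact ⟨p, ps, rfl⟩
        simp [hps]
      · rw [PySem.Chars.splitOn.go]
        have hpref : [')'].isPrefixOf (c :: cs) = false := by
          simp only [List.isPrefixOf, Bool.and_true,
            beq_eq_false_iff_ne, ne_eq]
          exact fun h => hc h.symm
        rw [hpref]
        simp only [Bool.false_eq_true, if_false]
        rw [ih fuel (by simpa using hf) (c :: cur) acc]
        obtain ⟨p, ps, hps⟩ : ∃ p ps, pvSplit cs = p :: ps := by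
          cases h : pvSplit cs with
          | nil => exact absurd h (pvSplit_ne_nil cs)
          | cons p ps => exact ⟨p, ps, rfl⟩
        rw [pvSplit_cons_other c cs p ps hc hps, hps]
        simp

lemma splitOn_eq_pvSplit (cs : List Char) : PySem.Chars.splitOn cs [')'] = pvSplit cs := by
  rw [PySem.Chars.splitOn, splitOn_go_eq cs (cs.length + 1) (by omega) [] []]
  cases h : pvSplit cs with
  | nil => exact absurd h (pvSplit_ne_nil cs)
  | cons p ps => simp

-- B's processing of the piece remaining after an already-open '(' with accumulated content m
def pvBInner : List (List Char) → List Char → List String → Option (List String)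
  | [], _, _ => none
  | [_], _, _ => none
  | p :: ps, m, acc =>
      if p.contains '(' then none
      else if (m ++ p).length ≤ 1 then none
      else pvBPieces ps (acc ++ [String.ofList (m ++ p)])

-- unfolding lemmas for pvARun by character class
lemma pvARun_nil_none (acc : List String) : pvARun [] acc none = some acc := rfl
lemma pvARun_nil_some (acc : List String) (m : List Char) : pvARun [] acc (some m) = none := rfl
lemma pvARun_open_none (cs : List Char) (acc : List String) :
    pvARun ('(' :: cs) acc none = pvARun cs acc (some []) := rfl
lemma pvARun_open_some (cs : List Char) (acc : List String) (m : List Char) :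
    pvARun ('(' :: cs) acc (some m) = none := rfl
lemma pvARun_close_none (cs : List Char) (acc : List String) :
    pvARun (')' :: cs) acc none = none := rfl
lemma pvARun_close_some (cs : List Char) (acc : List String) (m : List Char) :
    pvARun (')' :: cs) acc (some m)
      = if m.length ≤ 1 then none else pvARun cs (acc ++ [String.ofList m]) none := rfl
lemma pvARun_chr_some (c : Char) (cs : List Char) (acc : List String) (m : List Char)
    (h1 : c ≠ '(') (h2 : c ≠ ')') :
    pvARun (c :: cs) acc (some m) = pvARun cs acc (some (m ++ [c])) := by
  simp [pvARun, h1, h2]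
lemma pvARun_chr_none (c : Char) (cs : List Char) (acc : List String)
    (h1 : c ≠ '(') (h2 : c ≠ ')') :
    pvARun (c :: cs) acc none
      = if ¬ pvLetters.contains c then none
        else pvARun cs (acc ++ [String.ofList [c]]) none := by
  simp [pvARun, h1, h2]

lemma count_one_iff (p : List Char) :
    ('(' :: p).count '(' = 1 ↔ p.contains '(' = false := by
  rw [List.count_cons_self]
  constructor
  · intro h
    have h0 : p.count '(' = 0 := by omega
    simpa [List.contains_eq_mem] using List.count_eq_zero.1 h0
  · intro h
    have h0 : p.count '(' = 0 :=
      List.count_eq_zero.2 (by simpa [List.contains_eq_mem] using h)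
    omega

lemma core_eq (cs : List Char) : ∀ acc,
    pvARun cs acc none = pvBPieces (pvSplit cs) acc ∧
    ∀ m, pvARun cs acc (some m) = pvBInner (pvSplit cs) m acc := by
  induction cs with
  | nil =>
    intro acc
    refine ⟨by simp [pvARun_nil_none, pvSplit, pvBPieces], fun m => ?_⟩
    simp [pvARun_nil_some, pvSplit, pvBInner]
  | cons c cs ih =>
    intro acc
    obtain ⟨p, ps, hps⟩ : ∃ p ps, pvSplit cs = p :: ps := by
      cases h : pvSplit cs with
      | nil => exact absurd h (pvSplit_ne_nil cs)
      | cons p ps => exact ⟨p, ps, rfl⟩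
    by_cases hc : c = ')'
    · subst hc
      rw [pvSplit_cons_close, hps]
      constructor
      · rw [pvARun_close_none]
        cases ps <;> simp [pvBPieces]
      · intro m
        rw [pvARun_close_some]
        simp only [pvBInner, List.contains_eq_mem, List.not_mem_nil, decide_false,
          Bool.false_eq_true, if_false, List.append_nil]
        by_cases hm : m.length ≤ 1
        · simp [hm]
        · simp only [if_neg hm]
          have := (ih (acc ++ [String.ofList m])).1
          rwa [hps] at this
    · by_cases hop : c = '('
      · subst hop
        rw [pvSplit_cons_other '(' cs p ps (by decide) hps]
        constructor
        · rw [pvARun_open_none]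
          have hI := (ih acc).2 []
          rw [hps] at hI
          rw [hI]
          cases ps with
          | nil => simp [pvBPieces, pvBInner, List.contains_eq_mem]
          | cons q qs =>
            by_cases hp : p.contains '('
            · have hcnt : ('(' :: p).count '(' ≠ 1 := by
                intro h; rw [(count_one_iff p).1 h] at hp; exact Bool.false_ne_true hp
              have hm : '(' ∈ p := by simpa [List.contains_eq_mem] using hp
              simp [pvBPieces, pvBInner, hm, List.count_eq_zero]
            · have hcnt : ¬ ('(' :: p).count '(' ≠ 1 :=
                not_not_intro ((count_one_iff p).2 (Bool.eq_false_iff.2 (by simpa using hp)))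
              simp only [pvBPieces, pvBInner, if_neg hcnt, List.takeWhile_cons,
                List.dropWhile_cons]
              simp []
              exact fun h => absurd h (by simpa [List.contains_eq_mem] using hp)
        · intro m
          rw [pvARun_open_some]
          cases ps with
          | nil => simp [pvBInner]
          | cons q qs => simp [pvBInner, List.contains_eq_mem]
      · -- ordinary character c, neither '(' nor ')'
        have h1 : ('(' == c) = false := beq_eq_false_iff_ne.2 fun h => hop h.symm
        have h2 : (c == '(') = false := beq_eq_false_iff_ne.2 hop
        rw [pvSplit_cons_other c cs p ps hc hps]
        constructor
        · rw [pvARun_chr_none c cs acc hop hc]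
          have hnec : ¬ ('(' = c) := fun h => hop h.symm
          by_cases hl : pvLetters.contains c
          · have hmem : c ∈ pvLetters := by simpa [List.contains_eq_mem] using hl
            simp only [hl, not_true_eq_false, if_false]
            have hI := (ih (acc ++ [String.ofList [c]])).1
            rw [hps] at hI
            rw [hI]
            cases ps with
            | nil => simp [pvBPieces, hnec, hmem]
            | cons q qs => simp [pvBPieces, hop, hmem]
          · have hmem : ¬ c ∈ pvLetters := by simpa [List.contains_eq_mem] using hl
            simp only [hl]
            have hlf : pvLetters.contains c = false := by simpa using hl
            cases ps with
            | nil =>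
              simp [pvBPieces, List.all_cons, hmem]
            | cons q qs =>
              simp [pvBPieces, hop,
                List.all_cons, hmem]
        · intro m
          rw [pvARun_chr_some c cs acc m hop hc]
          have hI := (ih acc).2 (m ++ [c])
          rw [hps] at hI
          rw [hI]
          cases ps with
          | nil => simp [pvBInner]
          | cons q qs =>
            have hml : m ++ [c] ++ p = m ++ c :: p := by simp
            have hnec2 : ¬ ('(' = c) := fun h => hop h.symm
            simp [pvBInner, hml, hnec2]

-- ===== VERDICT (by name: the statement is the Claim_ definition above) =====
set_option maxHeartbeats 1000000 in
theorem constituents_of_modified_fasta_spec : Claim_equal_constituents_of_modified_fasta := by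
  intro x chain_type _
  unfold Spec_constituents_of_modified_fasta
  unfold constituents_of_modified_fasta constituents_of_modified_fasta_alt
  simp only [splitOn_eq_pvSplit]
  by_cases h : (if chain_type = "protein" then PySem.Str.upper (PySem.Str.strip x)
      else x).toList.all (fun c => pvAllowed.contains c)
  · simp only [h, not_true_eq_false, if_false]
    exact (core_eq _ []).1
  · simp only [h, Bool.false_eq_true, not_false_eq_true, if_true]
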